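-- pv_equiv track=rewrite | github.com/JingJiang-web/unitary-for-Hermitian-type | unitary_ABCD.py | find_q_r
-- ===== SOURCE A (Python) =====
-- def find_q_r(arr):
--     if len(arr) == 0:
--         return 0, 0
--     first_element = arr[0]
--     q = 0
--     for element in arr:
--         if element == first_element:
--             q = q + 1
--         else:
--             break
--     target_num = first_element - 1
--     r = 0
--     for idx in range(q, len(arr)):
--         if arr[idx] == target_num:
--             r = idx + 1
--     if r == 0:
--         r = q
--     return q, r
-- ===== SOURCE B (Python) =====
-- def find_q_r(arr):
--     if not arr:
--         return 0, 0
--     first = arr[0]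
--     q = 1
--     for x in arr[1:]:
--         if x != first:
--             break
--         q += 1
--     target = first - 1
--     i = len(arr)
--     while i > 0:
--         if arr[i - 1] == target:
--             return q, i
--         i -= 1
--     return q, q
-- ===== Notes on version B (the rewrite author's own statement) =====
-- stated objective: alternative
-- what changed: r is found by scanning the array BACK-TO-FRONT and returning at the first match (valid because the leading run can never equal first-1), instead of A's forward pass over arr[q:] that keeps overwriting r; the early-return replaces A's last-match accumulator and the r==0 default.
import Mathlib
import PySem

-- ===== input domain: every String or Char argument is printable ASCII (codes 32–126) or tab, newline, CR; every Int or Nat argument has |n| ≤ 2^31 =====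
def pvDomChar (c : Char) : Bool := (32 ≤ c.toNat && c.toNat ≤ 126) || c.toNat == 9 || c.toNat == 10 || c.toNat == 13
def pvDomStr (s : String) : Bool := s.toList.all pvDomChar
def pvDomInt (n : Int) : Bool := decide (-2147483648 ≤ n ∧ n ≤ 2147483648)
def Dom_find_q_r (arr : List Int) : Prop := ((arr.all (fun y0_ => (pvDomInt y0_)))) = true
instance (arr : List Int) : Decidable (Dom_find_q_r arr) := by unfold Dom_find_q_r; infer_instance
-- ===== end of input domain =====

-- B finds r by a back-to-front scan with an early return (the first match from the end is A's
-- last forward match, and the leading run can never equal first-1), instead of A's forward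
-- last-match accumulator over arr[q:] with the r==0 default; same O(n) cost.

-- ===== PORT A =====
-- first loop of A: 'for element in arr: if element == first: q += 1 else: break'
def findRunA (first : Int) : List Int → Int → Int
  | [], q => q
  | x :: xs, q => if x = first then findRunA first xs (q + 1) else q

def find_q_r (arr : List Int) : Int × Int :=
  if arr.length = 0 then (0, 0)
  else
    let first := PySem.List.pyGetD arr 0 0
    let q := findRunA first arr 0
    let target_num := first - 1
    let r := (PySem.List.pyRange q (arr.length : Int) 1).foldl
      (fun r idx => if PySem.List.pyGetD arr idx 0 = target_num then idx + 1 else r) 0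
    (q, if r = 0 then q else r)

-- ===== PORT B =====
-- B's 'for x in arr[1:]: if x != first: break; q += 1'
def runTailB (first : Int) : List Int → Int → Int
  | [], q => q
  | x :: xs, q => if x ≠ first then q else runTailB first xs (q + 1)

-- B's 'while i > 0: if arr[i-1] == target: return q, i; i -= 1' — the counter i is the Nat
-- argument, arr[i-1] is pyGetD at index i-1; 'some' is the early return, 'none' falls through.
def scanBackB (arr : List Int) (target : Int) : Nat → Option Int
  | 0 => none
  | k + 1 => if PySem.List.pyGetD arr (k : Int) 0 = target then some ((k : Int) + 1)
             else scanBackB arr target k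

def find_q_r_alt (arr : List Int) : Int × Int :=
  match arr with
  | [] => (0, 0)
  | first :: rest =>
    let q := runTailB first rest 1
    match scanBackB arr (first - 1) (first :: rest).length with
    | some r => (q, r)
    | none => (q, q)

-- ===== PRECONDITION & SPEC =====
def Spec_find_q_r (arr : List Int) (out : Int × Int) : Prop := out = find_q_r_alt arr
instance (arr : List Int) (out : Int × Int) : Decidable (Spec_find_q_r arr out) := by unfold Spec_find_q_r; infer_instance

-- ===== CLAIM (what is proved, stated in full; the proofs are below) =====
def Claim_equal_find_q_r : Prop := ∀ (arr : List Int), Dom_find_q_r arr → Spec_find_q_r arr (find_q_r arr)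

-- ===== LEMMAS AND PROOFS =====

-- A's first loop and B's tail loop agree (the branches are each other's negation).
theorem run_eq (first : Int) (l : List Int) : ∀ (q : Int), findRunA first l q = runTailB first l q := by
  induction l with
  | nil => intro q; rfl
  | cons x xs ih =>
    intro q
    by_cases h : x = first <;> simp [findRunA, runTailB, h, ih]

-- A's run loop returns q plus a run length t whose first t entries all equal `first`.
theorem run_spec (first : Int) : ∀ (l : List Int) (q : Int),
    ∃ t : Nat, findRunA first l q = q + (t : Int) ∧ t ≤ l.length ∧
      ∀ k < t, l.getD k 0 = first := by
  intro l
  induction l with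
  | nil => intro q; exact ⟨0, by simp [findRunA], by simp, by omega⟩
  | cons x xs ih =>
    intro q
    by_cases h : x = first
    · obtain ⟨t, ht, htle, hrun⟩ := ih (q + 1)
      refine ⟨t + 1, ?_, by simpa using htle, ?_⟩
      · simp [findRunA, h, ht]; omega
      · intro k hk
        cases k with
        | zero => simpa using h
        | succ k => simpa using hrun k (by omega)
    · exact ⟨0, by simp [findRunA, h], by simp, by omega⟩

-- Below the run the backward scan finds nothing: those entries equal `first`, not `first - 1`.
theorem scanBack_none (arr : List Int) (first : Int) (t : Nat)
    (hrun : ∀ k < t, arr.getD k 0 = first) :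
    ∀ k ≤ t, scanBackB arr (first - 1) k = none := by
  intro k
  induction k with
  | zero => intro _; rfl
  | succ k ih =>
    intro hk
    unfold scanBackB
    rw [PySem.List.pyGetD_natCast, hrun k (by omega), if_neg (by omega)]
    exact ih (by omega)

theorem scanBack_pos (arr : List Int) (target : Int) :
    ∀ k v, scanBackB arr target k = some v → 1 ≤ v := by
  intro k
  induction k with
  | zero => intro v h; simp [scanBackB] at h
  | succ k ih =>
    intro v h
    unfold scanBackB at h
    split at h
    · cases h; omega
    · exact ih v h

-- A's forward fold over range(t, m) equals B's backward scan from m (default 0),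
-- provided the first t entries are the run (so the backward scan stops there with none).
theorem fold_eq (arr : List Int) (first : Int) (t : Nat)
    (hrun : ∀ k < t, arr.getD k 0 = first) :
    ∀ m : Nat, t ≤ m →
      (PySem.List.pyRange (t : Int) (m : Int) 1).foldl
          (fun r idx => if PySem.List.pyGetD arr idx 0 = first - 1 then idx + 1 else r) 0
        = (scanBackB arr (first - 1) m).getD 0 := by
  intro m
  induction m with
  | zero =>
    intro hm
    have ht : t = 0 := by omega
    subst ht
    simp [PySem.List.pyRange_one_eq_nil, scanBackB]
  | succ m ih =>
    intro hm
    by_cases h : t = m + 1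
    · subst h
      rw [PySem.List.pyRange_one_eq_nil (by omega)]
      rw [scanBack_none arr first (m + 1) hrun (m + 1) (by omega)]
      rfl
    · have hm' : t ≤ m := by omega
      have hcast : ((m + 1 : Nat) : Int) = (m : Int) + 1 := by push_cast; ring
      rw [hcast, PySem.List.pyRange_one_succ_right (by exact_mod_cast hm'), List.foldl_append]
      simp only [List.foldl_cons, List.foldl_nil]
      unfold scanBackB
      rw [PySem.List.pyGetD_natCast]
      by_cases hc : arr.getD m 0 = first - 1
      · rw [if_pos hc, if_pos hc]; rfl
      · rw [if_neg hc, if_neg hc, ih hm']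

-- ===== VERDICT (by name: the statement is the Claim_ definition above) =====
theorem find_q_r_spec : Claim_equal_find_q_r := by
  intro arr _
  unfold Spec_find_q_r
  match arr with
  | [] => rfl
  | first :: rest =>
    obtain ⟨t, hq, htle, hrun⟩ := run_spec first (first :: rest) 0
    have hq' : findRunA first (first :: rest) 0 = (t : Int) := by rw [hq]; ring
    have hqB : runTailB first rest 1 = (t : Int) := by
      rw [← run_eq]
      have : findRunA first (first :: rest) 0 = findRunA first rest 1 := by
        simp [findRunA]
      rw [← this, hq']
    have hlen : (first :: rest).length = rest.length + 1 := by simp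
    have hfold := fold_eq (first :: rest) first t hrun (rest.length + 1)
      (by omega)
    simp only [find_q_r, find_q_r_alt, hlen]
    rw [if_neg (by omega)]
    simp only [PySem.List.pyGetD_zero_cons, hq']
    rw [hfold]
    cases hscan : scanBackB (first :: rest) (first - 1) (rest.length + 1) with
    | none => simp [hqB]
    | some v =>
      have hv := scanBack_pos (first :: rest) (first - 1) (rest.length + 1) v hscan
      simp [hqB, show ¬ (v = 0) from by omega]
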